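-- pv_equiv track=rewrite | github.com/mooss/semstat | textstat.py | delimiter_tokenizer
-- ===== SOURCE A (Python) =====
-- def delimiter_tokenizer(source, word_delimiters='.,?!:/\\_-'):
--     """Tokenize the text using characters delimiters.
--
--     Parameters
--     ----------
--     source : str
--         The text to tokenize.
--
--     word_delimiters : str, optional
--         The word delimiters.
--
--     Returns
--     -------
--     out : str
--         The text, tokenized according to the delimiters.
--     """
--     resultbuffer = list()
--     strbuffer = list()
--
--     if ' ' in word_delimiters:
--         word_delimiters -= ' '
--
--     for char in source:
--         if char in word_delimiters:
--             resultbuffer.append(''.join(strbuffer))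
--             resultbuffer.append(char)
--             strbuffer = list()
--         else:
--             strbuffer.append(char)
--
--     if len(strbuffer):
--         resultbuffer.append(''.join(strbuffer))
--
--     return ' '.join(resultbuffer)
-- ===== SOURCE B (Python) =====
-- import re
--
--
-- def delimiter_tokenizer(source, word_delimiters='.,?!:/\\_-'):
--     """Tokenize the text using characters delimiters (regex-based)."""
--     if ' ' in word_delimiters:
--         word_delimiters -= ' '
--
--     if not word_delimiters:
--         return source
--
--     tokens = re.split('([' + re.escape(word_delimiters) + '])', source)
--     if tokens[-1] == '':
--         tokens.pop()
--     return ' '.join(tokens)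
-- ===== Notes on version B (the rewrite author's own statement) =====
-- stated objective: idiomatic
-- what changed: Replaces A's char-by-char loop with two string buffers by a single re.split on a captured delimiter character class (dropping regex's one trailing empty token), the way an experienced Python developer would tokenize while keeping delimiters.
import Mathlib
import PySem

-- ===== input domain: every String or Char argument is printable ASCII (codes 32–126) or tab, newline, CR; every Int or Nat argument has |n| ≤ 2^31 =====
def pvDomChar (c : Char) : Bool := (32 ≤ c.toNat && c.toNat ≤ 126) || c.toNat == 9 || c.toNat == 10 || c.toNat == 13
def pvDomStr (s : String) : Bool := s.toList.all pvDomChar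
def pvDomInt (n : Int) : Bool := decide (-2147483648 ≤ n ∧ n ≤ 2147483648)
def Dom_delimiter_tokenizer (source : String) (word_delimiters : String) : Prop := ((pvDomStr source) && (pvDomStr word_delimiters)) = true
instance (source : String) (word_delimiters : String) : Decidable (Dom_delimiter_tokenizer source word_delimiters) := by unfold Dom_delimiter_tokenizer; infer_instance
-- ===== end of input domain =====

-- B replaces A's char-by-char buffer loop with a regex split on a delimiter character
-- class (delimiters captured as tokens): objective 'idiomatic', not claimed faster.

-- ===== PORT A =====
-- A's branch `if ' ' in word_delimiters: word_delimiters -= ' '` raises TypeError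
-- (str -= str); those inputs are excluded by Pre_ below, so the port omits it.
def delimiter_tokenizer (source : String) (word_delimiters : String) : String :=
  let st :=
    source.toList.foldl
      (fun (st : List String × List Char) c =>
        if c ∈ word_delimiters.toList then
          (st.1 ++ [String.ofList st.2, String.ofList [c]], [])
        else
          (st.1, st.2 ++ [c]))
      ([], [])
  let rb := if st.2.length ≠ 0 then st.1 ++ [String.ofList st.2] else st.1
  PySem.Str.join " " rb

-- ===== PORT B =====
-- Hand port of `re.split('([' + re.escape(d) + '])', s)` for a character class of
-- delimiters: exact — the parts between (and before/after) delimiter occurrences,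
-- alternating with the captured single-character delimiters.
def pvReSplitClass (d : List Char) (acc : List Char) : List Char → List String
  | [] => [String.ofList acc]
  | c :: rest =>
      if c ∈ d then String.ofList acc :: String.ofList [c] :: pvReSplitClass d [] rest
      else pvReSplitClass d (acc ++ [c]) rest

def delimiter_tokenizer_alt (source : String) (word_delimiters : String) : String :=
  if word_delimiters = "" then source
  else
    let tokens := pvReSplitClass word_delimiters.toList [] source.toList
    -- `if tokens[-1] == '': tokens.pop()` (re.split's list is always nonempty)
    let tokens := if tokens.getLast? = some "" then tokens.dropLast else tokens
    PySem.Str.join " " tokens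

-- ===== PRECONDITION & SPEC =====
-- Pre_ excludes delimiter strings containing a space, on which the Python A (and B)
-- raise TypeError at `word_delimiters -= ' '`.
def Pre_delimiter_tokenizer (source : String) (word_delimiters : String) : Prop :=
  ' ' ∉ word_delimiters.toList
instance (source : String) (word_delimiters : String) : Decidable (Pre_delimiter_tokenizer source word_delimiters) := by unfold Pre_delimiter_tokenizer; infer_instance
def pvWitness_delimiter_tokenizer : String × String := ("a.b,c", ".,")

def Spec_delimiter_tokenizer (source : String) (word_delimiters : String) (out : String) : Prop := out = delimiter_tokenizer_alt source word_delimiters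
instance (source : String) (word_delimiters : String) (out : String) : Decidable (Spec_delimiter_tokenizer source word_delimiters out) := by unfold Spec_delimiter_tokenizer; infer_instance

-- ===== CLAIM (what is proved, stated in full; the proofs are below) =====
def Claim_equal_delimiter_tokenizer : Prop := ∀ (source : String) (word_delimiters : String), Dom_delimiter_tokenizer source word_delimiters → Pre_delimiter_tokenizer source word_delimiters → Spec_delimiter_tokenizer source word_delimiters (delimiter_tokenizer source word_delimiters)

-- ===== LEMMAS AND PROOFS =====

-- drop a trailing empty token, as B does
def pvTrim (ts : List String) : List String :=
  if ts.getLast? = some "" then ts.dropLast else ts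

theorem pvReSplitClass_ne_nil (d : List Char) (acc l : List Char) :
    pvReSplitClass d acc l ≠ [] := by
  induction l generalizing acc with
  | nil => simp [pvReSplitClass]
  | cons c rest ih =>
      simp only [pvReSplitClass]
      split <;> simp [ih]

theorem pvTrim_cons (x : String) (ys : List String) (h : ys ≠ []) :
    pvTrim (x :: ys) = x :: pvTrim ys := by
  unfold pvTrim
  rcases ys with _ | ⟨y, zs⟩
  · exact absurd rfl h
  · simp only [List.getLast?_cons_cons, List.dropLast_cons_of_ne_nil (by simp : y :: zs ≠ [])]
    split <;> rfl

-- Invariant: finishing A's fold from state (rb, sb) over l yields rb followed by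
-- the trimmed regex-split of l started with pending buffer sb.
theorem pv_inv (d : List Char) (l : List Char) (rb : List String) (sb : List Char) :
    (let st :=
        l.foldl
          (fun (st : List String × List Char) c =>
            if c ∈ d then (st.1 ++ [String.ofList st.2, String.ofList [c]], [])
            else (st.1, st.2 ++ [c]))
          (rb, sb)
      if st.2.length ≠ 0 then st.1 ++ [String.ofList st.2] else st.1)
    = rb ++ pvTrim (pvReSplitClass d sb l) := by
  induction l generalizing rb sb with
  | nil =>
      simp only [List.foldl_nil, pvReSplitClass, pvTrim]
      rcases sb with _ | ⟨c, cs⟩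
      · simp
      · have h1 : String.ofList (c :: cs) ≠ "" := by
          intro h
          have := congrArg String.toList h
          simp at this
        simp [h1]
  | cons c rest ih =>
      simp only [List.foldl_cons, pvReSplitClass]
      by_cases hc : c ∈ d
      · simp only [hc, if_pos]
        rw [ih]
        rw [pvTrim_cons _ _ (by simp),
            pvTrim_cons _ _ (pvReSplitClass_ne_nil d [] rest)]
        simp
      · simp only [hc, if_false]
        rw [ih]

theorem pvReSplitClass_nil_delims (acc l : List Char) :
    pvReSplitClass [] acc l = [String.ofList (acc ++ l)] := by
  induction l generalizing acc with
  | nil => simp [pvReSplitClass]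
  | cons c rest ih => simp [pvReSplitClass, ih]

theorem pv_join_single (x : String) : PySem.Str.join " " [x] = x := by
  simp [PySem.Str.join, PySem.Chars.join, List.intercalate]

-- ===== VERDICT (by name: the statement is the Claim_ definition above) =====
theorem delimiter_tokenizer_spec : Claim_equal_delimiter_tokenizer := by
  intro source word_delimiters _ _
  show delimiter_tokenizer source word_delimiters = delimiter_tokenizer_alt source word_delimiters
  simp only [delimiter_tokenizer, delimiter_tokenizer_alt]
  have hinv := pv_inv word_delimiters.toList source.toList [] []
  simp only [List.nil_append] at hinv
  by_cases hwd : word_delimiters = ""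
  · subst hwd
    rw [if_pos rfl, hinv]
    simp only [String.toList_empty, pvReSplitClass_nil_delims, List.nil_append]
    unfold pvTrim
    rcases hs : source.toList with _ | ⟨c, cs⟩
    · have hsrc : String.ofList source.toList = source := by simp
      have h0 : source = "" := by rw [← hsrc, hs]
      rw [h0]
      simp [PySem.Str.join, PySem.Chars.join, List.intercalate]
    · have h1 : String.ofList (c :: cs) ≠ "" := by
        intro h
        have := congrArg String.toList h
        simp at this
      rw [if_neg (by simp [h1]), pv_join_single, ← hs]
      simp
  · rw [if_neg hwd]
    exact congrArg (PySem.Str.join " ") (hinv.trans (by rw [pvTrim]))
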